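-- pv_equiv track=rewrite | github.com/Adriandmen/05AB1E | lib/commands.py | first_replace
-- ===== SOURCE A (Python) =====
-- def first_replace(object1, object2, object3):
--
--     if type(object1) is list:
--         object1 = [str(x) for x in object1]
--     elif type(object1) is not list:
--         object1 = str(object1)
--
--     if type(object2) is list:
--         object2 = [str(x) for x in object2]
--     elif type(object2) is not list:
--         object2 = str(object2)
--
--     if type(object3) is list:
--         object3 = [str(x) for x in object3]
--     elif type(object3) is not list:
--         object3 = str(object3)
--
--     type1 = type(object1)
--     type2 = type(object2)
--     type3 = type(object3)
--
--     # [String String String]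
--     if type1 is str and type2 is str and type3 is str:
--         object1 = object1.replace(object2, object3, 1)
--         return object1
--
--     # [String List String]
--     elif type1 is str and type2 is list and type3 is str:
--         for element in object2:
--             object1 = object1.replace(str(element), object3, 1)
--         return object1
--
--     # [String List List]
--     elif type1 is str and type2 is list and type3 is list:
--         for index in range(0, len(object2)):
--             object1 = object1.replace(
--                 str(object2[index]), str(object3[index]), 1)
--         return object1
--
--     # [List String String]
--     elif type1 is list and type2 is str and type3 is str:
--         result_list = []
--         for sub_element in object1:
--             sub_element = sub_element.replace(object2, object3, 1)
--             result_list.append(sub_element)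
--         return result_list
--
--     # [List List String]
--     elif type1 is list and type2 is list and type3 is str:
--         result_list = []
--         for sub_element in object1:
--             for old in object2:
--                 sub_element = sub_element.replace(str(old), str(object3), 1)
--             result_list.append(sub_element)
--         return result_list
--
--     # [List List List]
--     elif type1 is list and type2 is list and type3 is list:
--         result_list = []
--         for current in object1:
--             for index in range(0, len(object2)):
--                 current = current.replace(object2[index], object3[index], 1)
--             result_list.append(current)
--         return result_list
--
--     raise Exception
-- ===== SOURCE B (Python) =====
-- def first_replace(object1, object2, object3):
--     # Return-value equivalent to A at string arguments: replace the first
--     # occurrence of object2 in object1 by object3, by an explicit left-to-right scan.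
--     s, old, new = str(object1), str(object2), str(object3)
--     if old == "":
--         return new + s
--     for i in range(len(s)):
--         if s.startswith(old, i):
--             return s[:i] + new + s[i + len(old):]
--     return s
-- ===== Notes on version B (the rewrite author's own statement) =====
-- stated objective: simpler
-- what changed: A dispatches on runtime types and calls str.replace(old, new, 1); B is one direct left-to-right scan that splices in the replacement at the first position where object2 is a prefix, with the empty-pattern case handled up front.
import Mathlib
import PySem

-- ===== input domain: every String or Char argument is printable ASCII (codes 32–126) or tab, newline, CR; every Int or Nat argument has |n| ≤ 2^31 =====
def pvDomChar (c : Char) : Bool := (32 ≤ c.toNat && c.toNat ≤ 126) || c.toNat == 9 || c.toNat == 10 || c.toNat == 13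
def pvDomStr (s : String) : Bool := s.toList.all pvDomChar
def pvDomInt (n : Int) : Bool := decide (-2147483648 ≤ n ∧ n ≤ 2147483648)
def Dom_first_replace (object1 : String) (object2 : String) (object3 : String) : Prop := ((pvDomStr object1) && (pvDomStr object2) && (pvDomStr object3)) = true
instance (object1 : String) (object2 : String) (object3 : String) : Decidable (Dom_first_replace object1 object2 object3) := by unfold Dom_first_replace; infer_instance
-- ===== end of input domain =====

-- B replaces A's type-dispatched str.replace(old, new, 1) call with a direct left-to-right
-- prefix-scan that splices the replacement at the first match (objective: simpler; same return value).


-- ===== PORT A =====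
-- str(x) on a str is the identity, so only the [String String String] branch is reachable at this type.
-- str.replace(object2, object3, 1) is ported by hand (no PySem count-limited replace): find the first
-- occurrence with PySem.Str.find, then splice; exact on all strings ('' is found at index 0, as in CPython.)
def first_replace (object1 : String) (object2 : String) (object3 : String) : String :=
  let i := PySem.Str.find object1 object2
  if i = -1 then object1
  else String.ofList (object1.toList.take i.toNat ++ object3.toList ++ object1.toList.drop (i.toNat + object2.toList.length))

-- ===== PORT B =====
-- left-to-right scan: at each position test whether object2 is a prefix; splice at the first hit
def frGo (old new : List Char) : List Char → List Char
  | [] => []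
  | c :: rest =>
    if old <+: c :: rest then new ++ (c :: rest).drop old.length
    else c :: frGo old new rest

def first_replace_alt (object1 : String) (object2 : String) (object3 : String) : String :=
  if object2 = "" then object3 ++ object1
  else String.ofList (frGo object2.toList object3.toList object1.toList)

-- ===== PRECONDITION & SPEC =====
def Spec_first_replace (object1 : String) (object2 : String) (object3 : String) (out : String) : Prop := out = first_replace_alt object1 object2 object3
instance (object1 : String) (object2 : String) (object3 : String) (out : String) : Decidable (Spec_first_replace object1 object2 object3 out) := by unfold Spec_first_replace; infer_instance

-- ===== CLAIM (what is proved, stated in full; the proofs are below) =====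
def Claim_equal_first_replace : Prop := ∀ (object1 : String) (object2 : String) (object3 : String), Dom_first_replace object1 object2 object3 → Spec_first_replace object1 object2 object3 (first_replace object1 object2 object3)

-- ===== LEMMAS AND PROOFS =====

-- find points at k iff there is a match at k and none before
theorem find_eq_of_first (s old : List Char) (k : Nat) (hpre : old <+: s.drop k)
    (hmin : ∀ j < k, ¬ old <+: s.drop j) : PySem.Chars.find s old = k := by
  have hinf : old <:+: s :=
    (PySem.Chars.isIn_iff_infix _ _).1
      ((PySem.Chars.exists_prefix_drop_iff_isIn old s).1 ⟨k, hpre⟩)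
  have hnn : 0 ≤ PySem.Chars.find s old := (PySem.Chars.find_nonneg_iff s old).2 hinf
  obtain ⟨h1, h2⟩ := PySem.Chars.find_spec (s := s) (sub := old) hnn
  rcases lt_trichotomy (PySem.Chars.find s old).toNat k with h | h | h
  · exact absurd h1 (hmin _ h)
  · omega
  · exact absurd hpre (h2 k h)

-- the scan frGo computes exactly "splice at the first occurrence found by find"
theorem frGo_spec (old new : List Char) (hold : old ≠ []) : ∀ s : List Char,
    frGo old new s =
      if PySem.Chars.find s old = -1 then s
      else s.take (PySem.Chars.find s old).toNat ++ new ++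
        s.drop ((PySem.Chars.find s old).toNat + old.length)
  | [] => by
    have : PySem.Chars.find ([] : List Char) old = -1 := by
      rw [PySem.Chars.find_eq_neg_one_iff]
      intro h
      exact hold (List.eq_nil_of_infix_nil h)
    simp [frGo, this]
  | c :: rest => by
    rw [frGo]
    by_cases hp : old <+: c :: rest
    · have hfind : PySem.Chars.find (c :: rest) old = 0 :=
        find_eq_of_first _ _ 0 (by simpa using hp) (by omega)
      simp [hp, hfind]
    · rw [if_neg hp, frGo_spec old new hold rest]
      by_cases hm : PySem.Chars.find rest old = -1
      · have hfind : PySem.Chars.find (c :: rest) old = -1 := by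
          rw [PySem.Chars.find_eq_neg_one_iff]
          intro hinf
          obtain ⟨j, hj⟩ := (PySem.Chars.exists_prefix_drop_iff_isIn old (c :: rest)).2
            ((PySem.Chars.isIn_iff_infix _ _).2 hinf)
          match j with
          | 0 => exact hp (by simpa using hj)
          | j + 1 =>
            exact (PySem.Chars.find_eq_neg_one_iff _ _).1 hm
              ((PySem.Chars.isIn_iff_infix _ _).1
                ((PySem.Chars.exists_prefix_drop_iff_isIn old rest).1 ⟨j, by simpa using hj⟩))
        simp [hm, hfind]
      · have hnn : 0 ≤ PySem.Chars.find rest old :=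
          lt_of_le_of_ne (PySem.Chars.neg_one_le_find _ _) (Ne.symm hm) |> fun h => by omega
        obtain ⟨h1, h2⟩ := PySem.Chars.find_spec (s := rest) (sub := old) hnn
        set i := (PySem.Chars.find rest old).toNat with hi
        have hfind : PySem.Chars.find (c :: rest) old = (i + 1 : Nat) := by
          apply find_eq_of_first
          · simpa using h1
          · intro j hj
            match j with
            | 0 => simpa using hp
            | j + 1 => simpa using h2 j (by omega)
        have hne : PySem.Chars.find (c :: rest) old ≠ -1 := by rw [hfind]; omega
        rw [if_neg hm, if_neg hne, hfind]
        have hadd : (i + 1) + old.length = (i + old.length) + 1 := by omega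
        simp [hadd, List.take_succ_cons, List.drop_succ_cons]

-- ===== VERDICT (by name: the statement is the Claim_ definition above) =====
theorem first_replace_spec : Claim_equal_first_replace := by
  intro o1 o2 o3 _
  unfold Spec_first_replace first_replace first_replace_alt
  by_cases h2 : o2 = ""
  · subst h2
    simp
  · have h2l : o2.toList ≠ [] := by
      intro h; exact h2 (by simpa using congrArg String.ofList h)
    rw [if_neg h2, frGo_spec _ _ h2l]
    by_cases hm : PySem.Chars.find o1.toList o2.toList = -1
    · simp [hm]
    · simp [hm]
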